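-- pv_equiv track=rewrite | github.com/pollyweb-org/pollyweb-docs | .tools/malformed-links.py | _pick_matching_link
-- ===== SOURCE A (Python) =====
-- def _pick_matching_link(token, links):
--     """Pick a matching link from a list where each item is either (text, href) or (src, text, href).
--     Returns a tuple (href, base_path) where base_path is the file the href is relative to (or None for same-file calls).
--     """
--     # Normalize for case-insensitive comparison backup
--     token_lower = token.lower()
--
--     # First pass: href contains token (case-sensitive)
--     for item in links:
--         if len(item) == 2:
--             text, href = item
--             base = None
--         else:
--             base, text, href = item
--         if token in href:
--             return href, base
--     # Second pass: text contains token (case-sensitive)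
--     for item in links:
--         if len(item) == 2:
--             text, href = item
--             base = None
--         else:
--             base, text, href = item
--         if token in text:
--             return href, base
--     # Third pass: href contains token (case-insensitive)
--     for item in links:
--         if len(item) == 2:
--             text, href = item
--             base = None
--         else:
--             base, text, href = item
--         if token_lower in href.lower():
--             return href, base
--     # Fourth pass: text contains token (case-insensitive)
--     for item in links:
--         if len(item) == 2:
--             text, href = item
--             base = None
--         else:
--             base, text, href = item
--         if token_lower in text.lower():
--             return href, base
--     return None, None
-- ===== SOURCE B (Python) =====
-- def _pick_matching_link(token, links):
--     """Single pass: score each link with its best matching priority and keep the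
--     earliest link with the lowest priority (strict '<' keeps first-match ties)."""
--     token_lower = token.lower()
--     best_priority = 5
--     best = (None, None)
--     for item in links:
--         if len(item) == 2:
--             text, href = item
--             base = None
--         else:
--             base, text, href = item
--         if token in href:
--             priority = 1
--         elif token in text:
--             priority = 2
--         elif token_lower in href.lower():
--             priority = 3
--         elif token_lower in text.lower():
--             priority = 4
--         else:
--             continue
--         if priority < best_priority:
--             best_priority = priority
--             best = (href, base)
--     return best
-- ===== Notes on version B (the rewrite author's own statement) =====
-- stated objective: alternative
-- what changed: Replaces A's four sequential scans over links (one per priority tier) by a single pass that scores each link with its best matching priority and keeps the earliest link of strictly lowest priority.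
-- outside the precondition, e.g. on _pick_matching_link('a', [('x', 'a'), ('z',)]): A returns ('a', None), B raises ValueError
import Mathlib
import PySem

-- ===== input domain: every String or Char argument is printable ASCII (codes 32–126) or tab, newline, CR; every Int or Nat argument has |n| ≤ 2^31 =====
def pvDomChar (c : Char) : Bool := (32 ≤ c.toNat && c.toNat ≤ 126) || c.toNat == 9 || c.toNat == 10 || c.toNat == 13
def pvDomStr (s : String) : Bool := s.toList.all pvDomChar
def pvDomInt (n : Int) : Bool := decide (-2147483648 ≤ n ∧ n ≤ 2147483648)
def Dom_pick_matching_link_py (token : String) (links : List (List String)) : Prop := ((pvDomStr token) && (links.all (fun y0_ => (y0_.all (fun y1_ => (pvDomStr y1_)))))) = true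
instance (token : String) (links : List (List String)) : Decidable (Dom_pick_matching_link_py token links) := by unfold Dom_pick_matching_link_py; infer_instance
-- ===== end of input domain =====

-- B replaces A's four sequential scans over links by one pass keeping the earliest
-- link of strictly lowest matching priority (objective: alternative, same cost).

-- ===== PORT A =====
-- First pass of A: first item whose href contains token (case-sensitive).
def pvPass1 (token : String) : List (List String) → Option (Option String × Option String)
  | [] => none
  | item :: rest =>
    match item with
    | [_text, href] => if PySem.Str.isIn token href then some (some href, none) else pvPass1 token rest
    | [base, _text, href] => if PySem.Str.isIn token href then some (some href, some base) else pvPass1 token rest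
    | _ => pvPass1 token rest  -- Python raises ValueError on this unpack; excluded by Pre_

-- Second pass of A: first item whose text contains token (case-sensitive).
def pvPass2 (token : String) : List (List String) → Option (Option String × Option String)
  | [] => none
  | item :: rest =>
    match item with
    | [text, href] => if PySem.Str.isIn token text then some (some href, none) else pvPass2 token rest
    | [base, text, href] => if PySem.Str.isIn token text then some (some href, some base) else pvPass2 token rest
    | _ => pvPass2 token rest  -- ValueError; excluded by Pre_

-- Third pass of A: first item whose lowered href contains token_lower.
def pvPass3 (tl : String) : List (List String) → Option (Option String × Option String)
  | [] => none
  | item :: rest =>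
    match item with
    | [_text, href] => if PySem.Str.isIn tl (PySem.Str.lower href) then some (some href, none) else pvPass3 tl rest
    | [base, _text, href] => if PySem.Str.isIn tl (PySem.Str.lower href) then some (some href, some base) else pvPass3 tl rest
    | _ => pvPass3 tl rest  -- ValueError; excluded by Pre_

-- Fourth pass of A: first item whose lowered text contains token_lower.
def pvPass4 (tl : String) : List (List String) → Option (Option String × Option String)
  | [] => none
  | item :: rest =>
    match item with
    | [text, _href] => if PySem.Str.isIn tl (PySem.Str.lower text) then some (some _href, none) else pvPass4 tl rest
    | [base, text, _href] => if PySem.Str.isIn tl (PySem.Str.lower text) then some (some _href, some base) else pvPass4 tl rest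
    | _ => pvPass4 tl rest  -- ValueError; excluded by Pre_

def pick_matching_link_py (token : String) (links : List (List String)) : Option String × Option String :=
  let token_lower := PySem.Str.lower token
  match pvPass1 token links with
  | some r => r
  | none =>
    match pvPass2 token links with
    | some r => r
    | none =>
      match pvPass3 token_lower links with
      | some r => r
      | none =>
        match pvPass4 token_lower links with
        | some r => r
        | none => (none, none)

-- ===== PORT B =====
-- Best matching priority of one link (5 = no match).
def pvPrio (token tl text href : String) : Nat :=
  if PySem.Str.isIn token href then 1
  else if PySem.Str.isIn token text then 2
  else if PySem.Str.isIn tl (PySem.Str.lower href) then 3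
  else if PySem.Str.isIn tl (PySem.Str.lower text) then 4
  else 5

-- One loop step of B: keep the state unless this link's priority is strictly smaller.
def pvStep (token tl : String) (st : Nat × (Option String × Option String)) (item : List String) :
    Nat × (Option String × Option String) :=
  match item with
  | [text, href] =>
      let q := pvPrio token tl text href
      if q < st.1 then (q, (some href, none)) else st
  | [base, text, href] =>
      let q := pvPrio token tl text href
      if q < st.1 then (q, (some href, some base)) else st
  | _ => st  -- Python raises ValueError on this unpack; excluded by Pre_

def pick_matching_link_py_alt (token : String) (links : List (List String)) : Option String × Option String :=
  let token_lower := PySem.Str.lower token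
  (links.foldl (pvStep token token_lower) (5, (none, none))).2

-- ===== PRECONDITION & SPEC =====
-- Pre_ excludes links containing an item whose length is not 2 or 3: unpacking such an
-- item raises ValueError — always in B, and in A unless an earlier item matched an
-- earlier pass (so A still returns on some excluded inputs; see the cite in claim.json).
def Pre_pick_matching_link_py (token : String) (links : List (List String)) : Prop :=
  ∀ item ∈ links, item.length = 2 ∨ item.length = 3
instance (token : String) (links : List (List String)) : Decidable (Pre_pick_matching_link_py token links) := by
  unfold Pre_pick_matching_link_py; infer_instance

def pvWitness_pick_matching_link_py : String × List (List String) := ("a", [["x", "ab"], ["b", "y", "z"]])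

def Spec_pick_matching_link_py (token : String) (links : List (List String)) (out : Option String × Option String) : Prop := out = pick_matching_link_py_alt token links
instance (token : String) (links : List (List String)) (out : Option String × Option String) : Decidable (Spec_pick_matching_link_py token links out) := by unfold Spec_pick_matching_link_py; infer_instance

-- ===== CLAIM (what is proved, stated in full; the proofs are below) =====
def Claim_equal_pick_matching_link_py : Prop := ∀ (token : String) (links : List (List String)), Dom_pick_matching_link_py token links → Pre_pick_matching_link_py token links → Spec_pick_matching_link_py token links (pick_matching_link_py token links)

-- ===== LEMMAS AND PROOFS =====

-- Normalize an item to (base, text, href); none = the shapes Python cannot unpack.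
def pvNorm : List String → Option (Option String × String × String)
  | [text, href] => some (none, text, href)
  | [base, text, href] => some (some base, text, href)
  | _ => none

def pvRes (n : Option String × String × String) : Option String × Option String := (some n.2.2, n.1)

def pvC1 (token : String) (n : Option String × String × String) : Bool := PySem.Str.isIn token n.2.2
def pvC2 (token : String) (n : Option String × String × String) : Bool := PySem.Str.isIn token n.2.1
def pvC3 (tl : String) (n : Option String × String × String) : Bool := PySem.Str.isIn tl (PySem.Str.lower n.2.2)
def pvC4 (tl : String) (n : Option String × String × String) : Bool := PySem.Str.isIn tl (PySem.Str.lower n.2.1)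

def pvPrioN (token tl : String) (n : Option String × String × String) : Nat :=
  if pvC1 token n then 1 else if pvC2 token n then 2 else if pvC3 tl n then 3
  else if pvC4 tl n then 4 else 5

lemma pvPrioN_eq (token tl : String) (b : Option String) (t h : String) :
    pvPrioN token tl (b, t, h) = pvPrio token tl t h := rfl

lemma pvPrioN_pos (token tl : String) (n : Option String × String × String) :
    1 ≤ pvPrioN token tl n := by unfold pvPrioN; split_ifs <;> omega

lemma pvPrioN_le (token tl : String) (n : Option String × String × String) :
    pvPrioN token tl n ≤ 5 := by unfold pvPrioN; split_ifs <;> omega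

def pvStepN (token tl : String) (st : Nat × (Option String × Option String))
    (n : Option String × String × String) : Nat × (Option String × Option String) :=
  if pvPrioN token tl n < st.1 then (pvPrioN token tl n, pvRes n) else st

-- The first link attaining the minimum priority (none = nothing matches).
def pvBestOf (token tl : String) : List (Option String × String × String) → Option (Nat × (Option String × String × String))
  | [] => none
  | n :: t =>
    match pvBestOf token tl t with
    | none => if pvPrioN token tl n < 5 then some (pvPrioN token tl n, n) else none
    | some (q, m) => if pvPrioN token tl n ≤ q then some (pvPrioN token tl n, n) else some (q, m)

lemma pvBestOf_mem (token tl : String) (nl : List (Option String × String × String)) :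
    ∀ (q : Nat) (m : Option String × String × String), pvBestOf token tl nl = some (q, m) →
    q = pvPrioN token tl m ∧ m ∈ nl ∧ q < 5 := by
  induction nl with
  | nil => intro q m h; simp [pvBestOf] at h
  | cons n t ih =>
    intro q m h
    unfold pvBestOf at h
    cases hbo : pvBestOf token tl t with
    | none =>
      rw [hbo] at h
      dsimp only at h
      by_cases h5 : pvPrioN token tl n < 5
      · rw [if_pos h5] at h; cases h; exact ⟨rfl, by simp, h5⟩
      · rw [if_neg h5] at h; simp at h
    | some p =>
      obtain ⟨q', m'⟩ := p
      rw [hbo] at h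
      dsimp only at h
      obtain ⟨hq', hm', hq5⟩ := ih q' m' hbo
      by_cases hle : pvPrioN token tl n ≤ q'
      · rw [if_pos hle] at h; cases h; exact ⟨rfl, by simp, by omega⟩
      · rw [if_neg hle] at h; cases h; exact ⟨hq', by simp [hm'], hq5⟩

lemma pvFoldlN_bestOf (token tl : String) (nl : List (Option String × String × String))
    (st : Nat × (Option String × Option String)) (h5 : st.1 ≤ 5) :
    nl.foldl (pvStepN token tl) st =
      match pvBestOf token tl nl with
      | none => st
      | some (q, m) => if q < st.1 then (q, pvRes m) else st := by
  induction nl generalizing st with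
  | nil => simp [pvBestOf]
  | cons n t ih =>
    rw [List.foldl_cons]
    unfold pvBestOf
    by_cases hlt : pvPrioN token tl n < st.1
    · rw [show pvStepN token tl st n = (pvPrioN token tl n, pvRes n) by simp [pvStepN, hlt]]
      rw [ih _ (by simpa using pvPrioN_le token tl n)]
      cases hbo : pvBestOf token tl t with
      | none =>
        have : pvPrioN token tl n < 5 := by omega
        simp [this, hlt]
      | some p =>
        obtain ⟨q, m⟩ := p
        obtain ⟨hq, hm, hq5⟩ := pvBestOf_mem token tl t q m hbo
        by_cases hle : pvPrioN token tl n ≤ q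
        · have : ¬ q < pvPrioN token tl n := by omega
          simp [hle, hlt, this]
        · have : q < pvPrioN token tl n := by omega
          have h2 : q < st.1 := by omega
          simp [hle, this, h2]
    · rw [show pvStepN token tl st n = st by simp [pvStepN, hlt]]
      rw [ih _ h5]
      cases hbo : pvBestOf token tl t with
      | none =>
        by_cases h55 : pvPrioN token tl n < 5
        · simp [h55, hlt]
        · simp [h55]
      | some p =>
        obtain ⟨q, m⟩ := p
        by_cases hle : pvPrioN token tl n ≤ q
        · have hq2 : ¬ q < st.1 := by omega
          simp [hle, hlt, hq2]
        · simp [hle]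

-- B over the raw list equals the normalized fold (ill-shaped items are skipped by both).
lemma pvFoldl_norm (token tl : String) (links : List (List String))
    (st : Nat × (Option String × Option String)) :
    links.foldl (pvStep token tl) st = (links.filterMap pvNorm).foldl (pvStepN token tl) st := by
  induction links generalizing st with
  | nil => simp
  | cons item rest ih =>
    match item with
    | [] => simp [pvStep, pvNorm, ih]
    | [a] => simp [pvStep, pvNorm, ih]
    | [t, h] => simp [pvStep, pvNorm, pvStepN, pvRes, pvPrioN_eq, ih]
    | [b, t, h] => simp [pvStep, pvNorm, pvStepN, pvRes, pvPrioN_eq, ih]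
    | a :: b' :: c :: d :: rest' => simp [pvStep, pvNorm, ih]

-- A's passes over the raw list are find? over the normalized list.
lemma pvPass1_norm (token : String) (links : List (List String)) :
    pvPass1 token links = ((links.filterMap pvNorm).find? (pvC1 token)).map pvRes := by
  induction links with
  | nil => simp [pvPass1]
  | cons item rest ih =>
    match item with
    | [] => simpa [pvPass1, pvNorm] using ih
    | [a] => simpa [pvPass1, pvNorm] using ih
    | [t, h] =>
      by_cases hc : PySem.Chars.isIn token.toList h.toList = true <;>
        simp [pvPass1, pvNorm, pvC1, pvRes, hc, ih]
    | [b, t, h] =>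
      by_cases hc : PySem.Chars.isIn token.toList h.toList = true <;>
        simp [pvPass1, pvNorm, pvC1, pvRes, hc, ih]
    | a :: b' :: c :: d :: rest' => simpa [pvPass1, pvNorm] using ih

lemma pvPass2_norm (token : String) (links : List (List String)) :
    pvPass2 token links = ((links.filterMap pvNorm).find? (pvC2 token)).map pvRes := by
  induction links with
  | nil => simp [pvPass2]
  | cons item rest ih =>
    match item with
    | [] => simpa [pvPass2, pvNorm] using ih
    | [a] => simpa [pvPass2, pvNorm] using ih
    | [t, h] =>
      by_cases hc : PySem.Chars.isIn token.toList t.toList = true <;>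
        simp [pvPass2, pvNorm, pvC2, pvRes, hc, ih]
    | [b, t, h] =>
      by_cases hc : PySem.Chars.isIn token.toList t.toList = true <;>
        simp [pvPass2, pvNorm, pvC2, pvRes, hc, ih]
    | a :: b' :: c :: d :: rest' => simpa [pvPass2, pvNorm] using ih

lemma pvPass3_norm (tl : String) (links : List (List String)) :
    pvPass3 tl links = ((links.filterMap pvNorm).find? (pvC3 tl)).map pvRes := by
  induction links with
  | nil => simp [pvPass3]
  | cons item rest ih =>
    match item with
    | [] => simpa [pvPass3, pvNorm] using ih
    | [a] => simpa [pvPass3, pvNorm] using ih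
    | [t, h] =>
      by_cases hc : PySem.Chars.isIn tl.toList (PySem.Chars.lower h.toList) = true <;>
        simp [pvPass3, pvNorm, pvC3, pvRes, hc, ih]
    | [b, t, h] =>
      by_cases hc : PySem.Chars.isIn tl.toList (PySem.Chars.lower h.toList) = true <;>
        simp [pvPass3, pvNorm, pvC3, pvRes, hc, ih]
    | a :: b' :: c :: d :: rest' => simpa [pvPass3, pvNorm] using ih

lemma pvPass4_norm (tl : String) (links : List (List String)) :
    pvPass4 tl links = ((links.filterMap pvNorm).find? (pvC4 tl)).map pvRes := by
  induction links with
  | nil => simp [pvPass4]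
  | cons item rest ih =>
    match item with
    | [] => simpa [pvPass4, pvNorm] using ih
    | [a] => simpa [pvPass4, pvNorm] using ih
    | [t, h] =>
      by_cases hc : PySem.Chars.isIn tl.toList (PySem.Chars.lower t.toList) = true <;>
        simp [pvPass4, pvNorm, pvC4, pvRes, hc, ih]
    | [b, t, h] =>
      by_cases hc : PySem.Chars.isIn tl.toList (PySem.Chars.lower t.toList) = true <;>
        simp [pvPass4, pvNorm, pvC4, pvRes, hc, ih]
    | a :: b' :: c :: d :: rest' => simpa [pvPass4, pvNorm] using ih

-- Pointwise links between the pass conditions and the priority.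
lemma pvC1_iff (token tl : String) (n : Option String × String × String) :
    pvC1 token n = true ↔ pvPrioN token tl n = 1 := by
  unfold pvPrioN; split_ifs <;> simp_all

lemma pvC2_iff (token tl : String) (n : Option String × String × String) (h1 : pvC1 token n = false) :
    pvC2 token n = true ↔ pvPrioN token tl n = 2 := by
  unfold pvPrioN; split_ifs <;> simp_all

lemma pvC3_iff (token tl : String) (n : Option String × String × String)
    (h1 : pvC1 token n = false) (h2 : pvC2 token n = false) :
    pvC3 tl n = true ↔ pvPrioN token tl n = 3 := by
  unfold pvPrioN; split_ifs <;> simp_all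

lemma pvC4_iff (token tl : String) (n : Option String × String × String)
    (h1 : pvC1 token n = false) (h2 : pvC2 token n = false) (h3 : pvC3 tl n = false) :
    pvC4 tl n = true ↔ pvPrioN token tl n = 4 := by
  unfold pvPrioN; split_ifs <;> simp_all

lemma pvPrioN_eq_five (token tl : String) (n : Option String × String × String)
    (h1 : pvC1 token n = false) (h2 : pvC2 token n = false) (h3 : pvC3 tl n = false)
    (h4 : pvC4 tl n = false) : pvPrioN token tl n = 5 := by
  unfold pvPrioN; split_ifs <;> simp_all

-- find? of the k-th condition, when no earlier priority occurs, locates the best link.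
lemma pvBestOf_of_find (token tl : String) (k : Nat) (hk : 1 ≤ k) (hk5 : k < 5)
    (nl : List (Option String × String × String))
    (hlow : ∀ n ∈ nl, k ≤ pvPrioN token tl n)
    (m : Option String × String × String)
    (hfind : nl.find? (fun n => pvPrioN token tl n == k) = some m) :
    pvBestOf token tl nl = some (k, m) := by
  induction nl with
  | nil => simp at hfind
  | cons n t ih =>
    rw [List.find?_cons] at hfind
    unfold pvBestOf
    by_cases hn : pvPrioN token tl n = k
    · simp [hn] at hfind
      subst hfind
      cases hbo : pvBestOf token tl t with
      | none => simp [hn, hk5]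
      | some p =>
        obtain ⟨q, m'⟩ := p
        obtain ⟨hq, hm', _⟩ := pvBestOf_mem token tl t q m' hbo
        have hle : pvPrioN token tl n ≤ q := by
          have := hlow m' (by simp [hm']); omega
        dsimp only
        rw [if_pos hle, hn]
    · have hbe : (pvPrioN token tl n == k) = false := by simp [hn]
      simp [hbe] at hfind
      have ht : pvBestOf token tl t = some (k, m) :=
        ih (fun x hx => hlow x (by simp [hx])) hfind
      rw [ht]
      have hkn : k ≤ pvPrioN token tl n := hlow n (by simp)
      have : ¬ pvPrioN token tl n ≤ k := by omega
      simp [this]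

lemma pvBestOf_none (token tl : String) (nl : List (Option String × String × String))
    (h : ∀ n ∈ nl, pvPrioN token tl n = 5) : pvBestOf token tl nl = none := by
  induction nl with
  | nil => rfl
  | cons n t ih =>
    unfold pvBestOf
    rw [ih (fun x hx => h x (by simp [hx]))]
    simp [h n (by simp)]

lemma pvFind?_congr {α : Type} (p q : α → Bool) (l : List α) (h : ∀ x ∈ l, p x = q x) :
    l.find? p = l.find? q := by
  induction l with
  | nil => rfl
  | cons a t ih =>
    rw [List.find?_cons, List.find?_cons, h a (by simp)]
    split <;> [rfl; exact ih (fun x hx => h x (by simp [hx]))]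

-- ===== VERDICT (by name: the statement is the Claim_ definition above) =====
theorem pick_matching_link_py_spec : Claim_equal_pick_matching_link_py := by
  intro token links _hdom _hpre
  unfold Spec_pick_matching_link_py
  unfold pick_matching_link_py pick_matching_link_py_alt
  dsimp only
  set tl := PySem.Str.lower token with htl
  set nl := links.filterMap pvNorm with hnl
  rw [pvFoldl_norm, pvPass1_norm, pvPass2_norm, pvPass3_norm, pvPass4_norm]
  rw [pvFoldlN_bestOf token tl nl (5, (none, none)) (by simp)]
  -- stage 1
  cases h1 : nl.find? (pvC1 token) with
  | some m =>
    have hb : pvBestOf token tl nl = some (1, m) := by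
      apply pvBestOf_of_find token tl 1 (by omega) (by omega) nl
        (fun n _ => pvPrioN_pos token tl n)
      rw [← h1]
      exact (pvFind?_congr _ _ nl (fun n _ => by
        by_cases hc : pvC1 token n = true
        · simp [hc, (pvC1_iff token tl n).mp hc]
        · have hc' : pvC1 token n = false := by simpa using hc
          have : pvPrioN token tl n ≠ 1 := fun he => by
            simp [(pvC1_iff token tl n).mpr he] at hc'
          simp [hc', this])).symm
    simp [hb]
  | none =>
    have hL1 : ∀ n ∈ nl, pvC1 token n = false := by
      intro n hn; simpa using List.find?_eq_none.mp h1 n hn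
    have hlow2 : ∀ n ∈ nl, 2 ≤ pvPrioN token tl n := by
      intro n hn
      have hp := pvPrioN_pos token tl n
      have : pvPrioN token tl n ≠ 1 := fun he => by
        have hc := (pvC1_iff token tl n).mpr he
        rw [hL1 n hn] at hc
        exact Bool.false_ne_true hc
      omega
    -- stage 2
    cases h2 : nl.find? (pvC2 token) with
    | some m =>
      have hb : pvBestOf token tl nl = some (2, m) := by
        apply pvBestOf_of_find token tl 2 (by omega) (by omega) nl hlow2
        rw [← h2]
        exact (pvFind?_congr _ _ nl (fun n hn => by
          by_cases hc : pvC2 token n = true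
          · simp [hc, (pvC2_iff token tl n (hL1 n hn)).mp hc]
          · have hc' : pvC2 token n = false := by simpa using hc
            have : pvPrioN token tl n ≠ 2 := fun he => by
              simp [(pvC2_iff token tl n (hL1 n hn)).mpr he] at hc'
            simp [hc', this])).symm
      simp [hb]
    | none =>
      have hL2 : ∀ n ∈ nl, pvC2 token n = false := by
        intro n hn; simpa using List.find?_eq_none.mp h2 n hn
      have hlow3 : ∀ n ∈ nl, 3 ≤ pvPrioN token tl n := by
        intro n hn
        have h2' := hlow2 n hn
        have : pvPrioN token tl n ≠ 2 := fun he => by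
          have hc := (pvC2_iff token tl n (hL1 n hn)).mpr he
          rw [hL2 n hn] at hc
          exact Bool.false_ne_true hc
        omega
      -- stage 3
      cases h3 : nl.find? (pvC3 tl) with
      | some m =>
        have hb : pvBestOf token tl nl = some (3, m) := by
          apply pvBestOf_of_find token tl 3 (by omega) (by omega) nl hlow3
          rw [← h3]
          exact (pvFind?_congr _ _ nl (fun n hn => by
            by_cases hc : pvC3 tl n = true
            · simp [hc, (pvC3_iff token tl n (hL1 n hn) (hL2 n hn)).mp hc]
            · have hc' : pvC3 tl n = false := by simpa using hc
              have : pvPrioN token tl n ≠ 3 := fun he => by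
                simp [(pvC3_iff token tl n (hL1 n hn) (hL2 n hn)).mpr he] at hc'
              simp [hc', this])).symm
        simp [hb]
      | none =>
        have hL3 : ∀ n ∈ nl, pvC3 tl n = false := by
          intro n hn; simpa using List.find?_eq_none.mp h3 n hn
        have hlow4 : ∀ n ∈ nl, 4 ≤ pvPrioN token tl n := by
          intro n hn
          have h3' := hlow3 n hn
          have : pvPrioN token tl n ≠ 3 := fun he => by
            have hc := (pvC3_iff token tl n (hL1 n hn) (hL2 n hn)).mpr he
            rw [hL3 n hn] at hc
            exact Bool.false_ne_true hc
          omega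
        -- stage 4
        cases h4 : nl.find? (pvC4 tl) with
        | some m =>
          have hb : pvBestOf token tl nl = some (4, m) := by
            apply pvBestOf_of_find token tl 4 (by omega) (by omega) nl hlow4
            rw [← h4]
            exact (pvFind?_congr _ _ nl (fun n hn => by
              by_cases hc : pvC4 tl n = true
              · simp [hc, (pvC4_iff token tl n (hL1 n hn) (hL2 n hn) (hL3 n hn)).mp hc]
              · have hc' : pvC4 tl n = false := by simpa using hc
                have : pvPrioN token tl n ≠ 4 := fun he => by
                  simp [(pvC4_iff token tl n (hL1 n hn) (hL2 n hn) (hL3 n hn)).mpr he] at hc'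
                simp [hc', this])).symm
          simp [hb]
        | none =>
          have hL4 : ∀ n ∈ nl, pvC4 tl n = false := by
            intro n hn; simpa using List.find?_eq_none.mp h4 n hn
          have hb : pvBestOf token tl nl = none :=
            pvBestOf_none token tl nl (fun n hn =>
              pvPrioN_eq_five token tl n (hL1 n hn) (hL2 n hn) (hL3 n hn) (hL4 n hn))
          simp [hb]
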